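-- pv_equiv track=rewrite | github.com/sushil32/Neura | services/tts/engine.py | _get_phonemes
-- ===== SOURCE A (Python) =====
-- from typing import AsyncGenerator, Dict, List, Optional, Tuple
--
-- def _get_phonemes(word: str) -> List[str]:
--     """Get approximate phonemes for a word."""
--     # Simple phoneme estimation
--     # In production, use g2p (grapheme to phoneme) library
--     phonemes = []
--     word = word.lower()
--
--     vowels = set('aeiou')
--     i = 0
--     while i < len(word):
--         char = word[i]
--
--         # Check for digraphs
--         if i < len(word) - 1:
--             digraph = word[i:i+2]
--             if digraph in ['th', 'sh', 'ch', 'wh', 'ph', 'ng']: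
--                 phonemes.append(digraph)
--                 i += 2
--                 continue
--
--         if char in vowels:
--             phonemes.append(char + char)  # Double for long vowel
--         elif char.isalpha():
--             phonemes.append(char)
--
--         i += 1
--
--     return phonemes
-- ===== SOURCE B (Python) =====
-- import re
--
-- _TOKEN_RE = re.compile(r'th|sh|ch|wh|ph|ng|.', re.S)
--
-- def _get_phonemes(word: str):
--     """Get approximate phonemes for a word."""
--     tokens = _TOKEN_RE.findall(word.lower())
--     phonemes = []
--     for tok in tokens:
--         if len(tok) == 2:
--             phonemes.append(tok)
--         elif tok in 'aeiou':
--             phonemes.append(tok + tok)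
--         elif tok.isalpha():
--             phonemes.append(tok)
--     return phonemes
-- ===== Notes on version B (the rewrite author's own statement) =====
-- stated objective: idiomatic
-- what changed: Replaced A's manual index-stepping while-loop (digraph lookahead fused with per-char emission) by a two-pass design: one regex (th|sh|ch|wh|ph|ng|.) tokenizes the lowercased word greedily, then a separate mapping pass turns each token into its phoneme.
import Mathlib
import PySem

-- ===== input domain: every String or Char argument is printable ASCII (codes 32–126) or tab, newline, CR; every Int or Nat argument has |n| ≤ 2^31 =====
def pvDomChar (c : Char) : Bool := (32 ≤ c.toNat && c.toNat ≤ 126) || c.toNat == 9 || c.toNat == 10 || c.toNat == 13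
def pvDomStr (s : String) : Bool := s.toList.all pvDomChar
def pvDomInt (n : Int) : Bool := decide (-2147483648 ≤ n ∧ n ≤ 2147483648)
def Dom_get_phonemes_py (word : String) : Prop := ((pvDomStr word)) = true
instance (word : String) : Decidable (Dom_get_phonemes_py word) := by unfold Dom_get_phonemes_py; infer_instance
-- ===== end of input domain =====

-- B re-tokenizes the lowercased word in one regex-style pass (digraphs first) and maps tokens
-- to phonemes in a second pass, instead of A's manual index-stepping loop; objective: idiomatic.

-- ===== PORT A =====
-- the digraph list of A's `in ['th', …]` test (shared literal constant)
def pvDigraphs : List (List Char) := [['t','h'],['s','h'],['c','h'],['w','h'],['p','h'],['n','g']]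

-- vowels = set('aeiou')
def pvVowels : PySem.Set Char := PySem.Set.ofList ['a','e','i','o','u']

-- A's while loop over the remaining (lowercased) characters; the two-char lookahead is word[i:i+2]
def pvLoopA : List Char → List String
  | [] => []
  | [c] =>
      if c ∈ pvVowels then [String.mk [c, c]]
      else if PySem.Chars.isalpha c then [String.mk [c]] else []
  | c :: c2 :: rest =>
      if [c, c2] ∈ pvDigraphs then String.mk [c, c2] :: pvLoopA rest
      else
        (if c ∈ pvVowels then [String.mk [c, c]]
         else if PySem.Chars.isalpha c then [String.mk [c]] else []) ++ pvLoopA (c2 :: rest)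

def get_phonemes_py (word : String) : List String :=
  pvLoopA (PySem.Str.lower word).toList

-- ===== PORT B =====
-- re.findall(r'th|sh|ch|wh|ph|ng|.', word, re.S): greedy digraph-first tokenization
def pvTokens : List Char → List (List Char)
  | [] => []
  | [c] => [[c]]
  | c :: c2 :: rest =>
      if [c, c2] ∈ pvDigraphs then [c, c2] :: pvTokens rest
      else [c] :: pvTokens (c2 :: rest)

-- B's mapping pass over one token
def pvMapTok (t : List Char) : List String :=
  if t.length == 2 then [String.mk t]
  else if PySem.Chars.isIn t ['a','e','i','o','u'] then [String.mk (t ++ t)]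
  else if PySem.Chars.strIsalpha t then [String.mk t]
  else []

def get_phonemes_py_alt (word : String) : List String :=
  (pvTokens (PySem.Str.lower word).toList).flatMap pvMapTok

-- ===== PRECONDITION & SPEC =====
def Spec_get_phonemes_py (word : String) (out : List String) : Prop := out = get_phonemes_py_alt word
instance (word : String) (out : List String) : Decidable (Spec_get_phonemes_py word out) := by unfold Spec_get_phonemes_py; infer_instance

-- ===== CLAIM (what is proved, stated in full; the proofs are below) =====
def Claim_equal_get_phonemes_py : Prop := ∀ (word : String), Dom_get_phonemes_py word → Spec_get_phonemes_py word (get_phonemes_py word)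

-- ===== LEMMAS AND PROOFS =====

theorem mem_pvVowels (c : Char) : c ∈ pvVowels ↔ c ∈ (['a','e','i','o','u'] : List Char) := by
  simp [pvVowels, PySem.Set.mem_ofList]

theorem pvMapTok_single (c : Char) :
    pvMapTok [c] =
      (if c ∈ pvVowels then [String.mk [c, c]]
       else if PySem.Chars.isalpha c then [String.mk [c]] else []) := by
  unfold pvMapTok
  by_cases hc : c ∈ (['a','e','i','o','u'] : List Char)
  · have h1 : PySem.Chars.isIn [c] ['a','e','i','o','u'] = true := by
      rw [PySem.Chars.isIn_iff_infix]; fin_cases hc <;> decide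
    have h2 : c ∈ pvVowels := (mem_pvVowels c).mpr hc
    simp [h1, h2]
  · have h1 : PySem.Chars.isIn [c] ['a','e','i','o','u'] = false := by
      rw [PySem.Chars.isIn_eq_false_iff]; intro h
      exact hc (by simpa using h.sublist.subset)
    have h2 : c ∉ pvVowels := fun h => hc ((mem_pvVowels c).mp h)
    simp [h1, h2, PySem.Chars.strIsalpha]

theorem pvLoopA_eq_tokens (cs : List Char) :
    pvLoopA cs = (pvTokens cs).flatMap pvMapTok := by
  induction cs using pvTokens.induct with
  | case1 => simp [pvLoopA, pvTokens]
  | case2 c => simpa [pvLoopA, pvTokens] using (pvMapTok_single c).symm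
  | case3 c c2 rest h ih => simp [pvLoopA, pvTokens, h, pvMapTok, ih]
  | case4 c c2 rest h ih =>
      simp only [pvLoopA, pvTokens, if_neg h, List.flatMap_cons, ih, pvMapTok_single c]

-- ===== VERDICT (by name: the statement is the Claim_ definition above) =====
theorem get_phonemes_py_spec : Claim_equal_get_phonemes_py := by
  intro word _
  unfold Spec_get_phonemes_py get_phonemes_py get_phonemes_py_alt
  exact pvLoopA_eq_tokens _
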